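-- pv_equiv track=rewrite | github.com/zainabacademics21/ds_fundamentals_zain | Assignment_5/25July.py | find_highest_calories_per_day
-- ===== SOURCE A (Python) =====
-- def find_highest_calories_per_day(filtered_data):
--     daily_calories = {}
--
--     # Group calories by date
--     for row in filtered_data:
--         date_str = row[0]  # Assuming date is the first column in your CSV
--         calories = int(row[1])  # Assuming calories is the second column in your CSV
--
--         if date_str in daily_calories:
--             daily_calories[date_str].append(calories)
--         else:
--             daily_calories[date_str] = [calories]
--
--     # Find maximum calories per day
--     highest_calories_per_day = {}
--
--     for date, calories_list in daily_calories.items():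
--         max_calories = max(calories_list)
--         highest_calories_per_day[date] = max_calories
--
--     return highest_calories_per_day
-- ===== SOURCE B (Python) =====
-- def find_highest_calories_per_day(filtered_data):
--     highest_calories_per_day = {}
--     for row in filtered_data:
--         date_str = row[0]
--         calories = int(row[1])
--         if date_str not in highest_calories_per_day or calories > highest_calories_per_day[date_str]:
--             highest_calories_per_day[date_str] = calories
--     return highest_calories_per_day
-- ===== Notes on version B (the rewrite author's own statement) =====
-- stated objective: simpler
-- what changed: Single pass keeping a running maximum per date instead of grouping all calories into per-date lists and taking max in a second pass.
import Mathlib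
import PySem

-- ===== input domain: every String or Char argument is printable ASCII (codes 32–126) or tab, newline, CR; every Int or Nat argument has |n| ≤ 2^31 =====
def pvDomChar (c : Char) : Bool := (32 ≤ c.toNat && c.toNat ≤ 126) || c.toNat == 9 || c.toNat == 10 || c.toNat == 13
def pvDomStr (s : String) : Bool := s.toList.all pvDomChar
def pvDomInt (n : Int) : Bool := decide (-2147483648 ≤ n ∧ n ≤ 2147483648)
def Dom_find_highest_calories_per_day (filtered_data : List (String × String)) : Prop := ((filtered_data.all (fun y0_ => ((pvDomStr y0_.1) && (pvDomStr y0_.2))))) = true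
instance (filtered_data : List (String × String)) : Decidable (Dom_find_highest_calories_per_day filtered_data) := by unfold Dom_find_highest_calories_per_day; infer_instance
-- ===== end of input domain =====

-- B replaces A's two-pass group-into-lists-then-max by a single pass keeping a running maximum per date (simpler).


-- ===== PORT A =====
-- int(row[1]) : Pre_ guarantees the parse succeeds, so `.getD 0` is never the raising case.
-- max(calories_list) : the lists built by the first loop are nonempty, so `.getD 0` is never the raising case.
def find_highest_calories_per_day (filtered_data : List (String × String)) : List (String × Int) :=
  let daily_calories : PySem.Dict String (List Int) :=
    filtered_data.foldl (fun d row =>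
      let date_str := row.1
      let calories := (PySem.Int.ofStr? row.2).getD 0
      if d.contains date_str then
        d.insert date_str (d.getD date_str [] ++ [calories])
      else
        d.insert date_str [calories]) PySem.Dict.empty
  let highest_calories_per_day : PySem.Dict String Int :=
    daily_calories.items.foldl (fun h p =>
      h.insert p.1 ((PySem.List.max? p.2 (fun y => y)).getD 0)) PySem.Dict.empty
  highest_calories_per_day.items

-- ===== PORT B =====
def find_highest_calories_per_day_alt (filtered_data : List (String × String)) : List (String × Int) :=
  (filtered_data.foldl (fun r row =>
      let date_str := row.1
      let calories := (PySem.Int.ofStr? row.2).getD 0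
      if !r.contains date_str || decide (r.getD date_str 0 < calories) then
        r.insert date_str calories
      else r) (PySem.Dict.empty : PySem.Dict String Int)).items

-- ===== PRECONDITION & SPEC =====
-- Pre_ excludes exactly the inputs where int(row[1]) raises ValueError in both A and B.
def Pre_find_highest_calories_per_day (filtered_data : List (String × String)) : Prop :=
  ∀ p ∈ filtered_data, (PySem.Int.ofStr? p.2).isSome = true
instance (filtered_data : List (String × String)) : Decidable (Pre_find_highest_calories_per_day filtered_data) := by unfold Pre_find_highest_calories_per_day; infer_instance
def pvWitness_find_highest_calories_per_day : (List (String × String)) :=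
  [("2024-07-01", "300"), ("2024-07-02", "250"), ("2024-07-01", "410")]

def Spec_find_highest_calories_per_day (filtered_data : List (String × String)) (out : List (String × Int)) : Prop := out = find_highest_calories_per_day_alt filtered_data
instance (filtered_data : List (String × String)) (out : List (String × Int)) : Decidable (Spec_find_highest_calories_per_day filtered_data out) := by unfold Spec_find_highest_calories_per_day; infer_instance

-- ===== CLAIM (what is proved, stated in full; the proofs are below) =====
def Claim_equal_find_highest_calories_per_day : Prop := ∀ (filtered_data : List (String × String)), Dom_find_highest_calories_per_day filtered_data → Pre_find_highest_calories_per_day filtered_data → Spec_find_highest_calories_per_day filtered_data (find_highest_calories_per_day filtered_data)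

-- ===== LEMMAS AND PROOFS =====

-- A's per-list max as used in its second loop
def pvMaxv (l : List Int) : Int := (PySem.List.max? l (fun y => y)).getD 0

def pvFm (p : String × List Int) : String × Int := (p.1, pvMaxv p.2)

lemma pvMaxv_cons (x : Int) (t : List Int) : pvMaxv (x :: t) = t.foldl max x := by
  simp [pvMaxv, PySem.List.max?_id_cons]

lemma pvMaxv_append_lt (l : List Int) (c : Int) (h : pvMaxv l < c) :
    pvMaxv (l ++ [c]) = c := by
  cases l with
  | nil => simp [pvMaxv_cons]
  | cons x t =>
      simp only [List.cons_append, pvMaxv_cons, List.foldl_append, List.foldl_cons, List.foldl_nil]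
      rw [pvMaxv_cons] at h
      omega

lemma pvMaxv_append_le (x : Int) (t : List Int) (c : Int) (h : c ≤ pvMaxv (x :: t)) :
    pvMaxv (x :: (t ++ [c])) = pvMaxv (x :: t) := by
  rw [pvMaxv_cons] at h
  simp only [pvMaxv_cons, List.foldl_append, List.foldl_cons, List.foldl_nil]
  omega

-- step functions of the two ports' loops (the ports' fold bodies, let-reduced)
def pvStepA (d : PySem.Dict String (List Int)) (row : String × String) : PySem.Dict String (List Int) :=
  if d.contains row.1 then d.insert row.1 (d.getD row.1 [] ++ [(PySem.Int.ofStr? row.2).getD 0])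
  else d.insert row.1 [(PySem.Int.ofStr? row.2).getD 0]

def pvStepB (r : PySem.Dict String Int) (row : String × String) : PySem.Dict String Int :=
  if !r.contains row.1 || decide (r.getD row.1 0 < (PySem.Int.ofStr? row.2).getD 0) then
    r.insert row.1 ((PySem.Int.ofStr? row.2).getD 0)
  else r

lemma pv_fm_key (k : String) :
    ((fun p : String × Int => p.1 == k) ∘ pvFm) = (fun p : String × List Int => p.1 == k) := by
  funext q; simp [pvFm, Function.comp]

lemma pv_contains_map_fm (d : PySem.Dict String (List Int)) (k : String) :
    (PySem.Dict.mk (d.items.map pvFm)).contains k = d.contains k := by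
  simp only [PySem.Dict.contains, List.any_map, pv_fm_key]

lemma pv_get?_map_fm (d : PySem.Dict String (List Int)) (k : String) :
    (PySem.Dict.mk (d.items.map pvFm)).get? k = (d.get? k).map pvMaxv := by
  simp only [PySem.Dict.get?, List.find?_map, pv_fm_key]
  cases List.find? (fun p : String × List Int => p.1 == k) d.items <;> simp [pvFm]

-- the single-step simulation: B's dict stays the pvFm-image of A's dict
lemma pv_step_sim (d : PySem.Dict String (List Int)) (row : String × String)
    (hnd : d.keys.Nodup) (hne : ∀ p ∈ d.items, p.2 ≠ []) :
    pvStepB (PySem.Dict.mk (d.items.map pvFm)) row = PySem.Dict.mk ((pvStepA d row).items.map pvFm) := by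
  obtain ⟨date, s⟩ := row
  set cal := (PySem.Int.ofStr? s).getD 0 with hcal
  by_cases hc : d.contains date = true
  · -- existing key
    obtain ⟨l₀, hl₀⟩ : ∃ l₀, d.get? date = some l₀ := by
      rcases h : d.get? date with _ | l
      · rw [PySem.Dict.contains_eq_isSome_get?, h] at hc; simp at hc
      · exact ⟨l, rfl⟩
    have hgd : d.getD date [] = l₀ := by simp [PySem.Dict.getD, hl₀]
    have hBc : (PySem.Dict.mk (d.items.map pvFm)).contains date = true := by
      rw [pv_contains_map_fm]; exact hc
    have hBg : (PySem.Dict.mk (d.items.map pvFm)).getD date 0 = pvMaxv l₀ := by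
      simp [PySem.Dict.getD, pv_get?_map_fm, hl₀]
    have hAitems : (pvStepA d (date, s)).items =
        d.items.map (fun p => if p.1 == date then (date, l₀ ++ [cal]) else p) := by
      show (if d.contains date then d.insert date (d.getD date [] ++ [cal])
            else d.insert date [cal]).items = _
      rw [if_pos hc, hgd]
      exact PySem.Dict.items_insert_of_contains d _ hc
    -- the unique entry at key `date` is (date, l₀)
    have hentry : ∀ p ∈ d.items, (p.1 == date) = true → p = (date, l₀) := by
      rintro ⟨pk, pv⟩ hp hpk
      have hk : pk = date := by exact_mod_cast (beq_iff_eq).mp hpk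
      subst hk
      have : d.get? pk = some pv := PySem.Dict.get?_of_mem_items d hp hnd
      rw [hl₀] at this
      simp_all
    by_cases hlt : (PySem.Dict.mk (d.items.map pvFm)).getD date 0 < cal
    · -- B overwrites with cal; A's list gets cal appended, new max = cal
      have hmax : pvMaxv (l₀ ++ [cal]) = cal := pvMaxv_append_lt l₀ cal (by rwa [hBg] at hlt)
      have hB : pvStepB (PySem.Dict.mk (d.items.map pvFm)) (date, s) =
          (PySem.Dict.mk (d.items.map pvFm)).insert date cal := by
        show (if !_ || decide _ then _ else _) = _
        rw [if_pos (by simp only [hBc, Bool.not_true, Bool.false_or, decide_eq_true_eq]; exact hlt)]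
      rw [hB]
      apply PySem.Dict.ext
      rw [PySem.Dict.items_insert_of_contains _ _ hBc, hAitems]
      simp only [List.map_map]
      apply List.map_congr_left
      intro p hp
      by_cases hpk : (p.1 == date) = true
      · simp [Function.comp, hpk, pvFm, hmax]
      · simp [Function.comp, hpk, pvFm]
    · -- B unchanged; A's appended cal does not change the max
      have hl₀ne : l₀ ≠ [] := hne (date, l₀) (PySem.Dict.mem_items_of_get?_eq_some d hl₀)
      obtain ⟨x, t, rfl⟩ : ∃ x t, l₀ = x :: t := by
        cases l₀ with | nil => exact absurd rfl hl₀ne | cons x t => exact ⟨x, t, rfl⟩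
      have hmax : pvMaxv (x :: (t ++ [cal])) = pvMaxv (x :: t) :=
        pvMaxv_append_le x t cal (by rw [hBg] at hlt; omega)
      have hB : pvStepB (PySem.Dict.mk (d.items.map pvFm)) (date, s) =
          PySem.Dict.mk (d.items.map pvFm) := by
        show (if !_ || decide _ then _ else _) = _
        rw [if_neg (by simp only [hBc, Bool.not_true, Bool.false_or, decide_eq_true_eq]; exact hlt)]
      rw [hB]
      apply PySem.Dict.ext
      rw [hAitems]
      simp only [List.map_map]
      symm
      apply List.map_congr_left
      intro p hp
      by_cases hpk : (p.1 == date) = true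
      · have := hentry p hp hpk
        subst this
        simp [Function.comp, pvFm, hmax]
      · simp [Function.comp, hpk, pvFm]
  · -- new key: both append
    have hc' : d.contains date = false := by simpa using hc
    have hBc : (PySem.Dict.mk (d.items.map pvFm)).contains date = false := by
      rw [pv_contains_map_fm]; exact hc'
    have hA : pvStepA d (date, s) = d.insert date [cal] := by
      show (if d.contains date then _ else _) = _
      rw [if_neg (by simp [hc'])]
    have hB : pvStepB (PySem.Dict.mk (d.items.map pvFm)) (date, s) =
        (PySem.Dict.mk (d.items.map pvFm)).insert date cal := by
      show (if !_ || decide _ then _ else _) = _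
      rw [if_pos (by simp [hBc])]
    rw [hA, hB]
    apply PySem.Dict.ext
    rw [PySem.Dict.items_insert_of_not_contains _ _ hBc,
        PySem.Dict.items_insert_of_not_contains _ _ hc']
    simp [pvFm, pvMaxv_cons]

lemma pv_stepA_nodup (d : PySem.Dict String (List Int)) (row : String × String)
    (hnd : d.keys.Nodup) : (pvStepA d row).keys.Nodup := by
  unfold pvStepA
  split <;> exact PySem.Dict.nodup_keys_insert _ _ _ hnd

lemma pv_stepA_nonempty (d : PySem.Dict String (List Int)) (row : String × String)
    (hne : ∀ p ∈ d.items, p.2 ≠ []) : ∀ p ∈ (pvStepA d row).items, p.2 ≠ [] := by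
  unfold pvStepA
  intro p hp
  split at hp <;> rcases (PySem.Dict.mem_items_insert _ _ _ _).mp hp with h | ⟨h, _⟩
  · subst h; simp
  · exact hne p h
  · subst h; simp
  · exact hne p h

-- loop-level simulation
lemma pv_loop_sim (rows : List (String × String)) (d : PySem.Dict String (List Int))
    (hnd : d.keys.Nodup) (hne : ∀ p ∈ d.items, p.2 ≠ []) :
    rows.foldl pvStepB (PySem.Dict.mk (d.items.map pvFm)) =
      PySem.Dict.mk ((rows.foldl pvStepA d).items.map pvFm) := by
  induction rows generalizing d with
  | nil => rfl
  | cons r rs ih =>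
      simp only [List.foldl_cons]
      rw [pv_step_sim d r hnd hne]
      exact ih (pvStepA d r) (pv_stepA_nodup d r hnd) (pv_stepA_nonempty d r hne)

lemma pv_loopA_nodup (rows : List (String × String)) :
    (rows.foldl pvStepA PySem.Dict.empty).keys.Nodup := by
  have : ∀ (rs : List (String × String)) (d : PySem.Dict String (List Int)),
      d.keys.Nodup → (rs.foldl pvStepA d).keys.Nodup := by
    intro rs
    induction rs with
    | nil => intro d h; exact h
    | cons r rs ih => intro d h; exact ih _ (pv_stepA_nodup d r h)
  exact this rows _ PySem.Dict.nodup_keys_empty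

-- ===== VERDICT (by name: the statement is the Claim_ definition above) =====
theorem find_highest_calories_per_day_spec : Claim_equal_find_highest_calories_per_day := by
  intro fd _ _
  unfold Spec_find_highest_calories_per_day
  show ((fd.foldl pvStepA PySem.Dict.empty).items.foldl
          (fun h p => h.insert p.1 ((PySem.List.max? p.2 (fun y => y)).getD 0)) PySem.Dict.empty).items
      = (fd.foldl pvStepB (PySem.Dict.empty : PySem.Dict String Int)).items
  set daily := fd.foldl pvStepA PySem.Dict.empty with hd
  have hnd : daily.keys.Nodup := pv_loopA_nodup fd
  have h2 : (daily.items.foldl (fun h p => h.insert p.1 ((PySem.List.max? p.2 (fun y => y)).getD 0)) PySem.Dict.empty).items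
      = daily.items.map pvFm := by
    rw [PySem.Dict.items_foldl_insert_fresh daily.items (fun p => p.1)
        (fun p => (PySem.List.max? p.2 (fun y => y)).getD 0) PySem.Dict.empty
        (fun a _ => PySem.Dict.contains_empty _) (by exact hnd)]
    simp [pvFm, pvMaxv, PySem.Dict.empty]
  have h3 : fd.foldl pvStepB (PySem.Dict.empty : PySem.Dict String Int)
      = PySem.Dict.mk (daily.items.map pvFm) := by
    have := pv_loop_sim fd PySem.Dict.empty PySem.Dict.nodup_keys_empty (by intro p hp; cases hp)
    simpa [PySem.Dict.empty] using this
  rw [h2, h3]
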